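-- pv_equiv track=rewrite | github.com/dnorum/kryptos | key_autokey_english3_pruned/key_autokey.py | substringsByLength
-- ===== SOURCE A (Python) =====
-- def substring(string, substringLength):
-- 	result = []
-- 	stringLength = len(string)
-- 	if stringLength < substringLength or substringLength == 0:
-- 		return result
-- 	for i in range(0, stringLength - substringLength + 1):
-- 		result.append(string[i:i+substringLength])
-- 	return result
--
-- def substringsByLength(string):
-- 	result = [[]]
-- 	length = len(string)
-- 	if length == 0:
-- 		return result
-- 	for i in range(1, length + 1):
-- 		result.append(substring(string, i))
-- 	return result
-- ===== SOURCE B (Python) =====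
-- def substringsByLength(string):
-- 	n = len(string)
-- 	result = [[] for _ in range(n + 1)]
-- 	for i in range(n):
-- 		for j in range(i + 1, n + 1):
-- 			result[j - i].append(string[i:j])
-- 	return result
-- ===== Notes on version B (the rewrite author's own statement) =====
-- stated objective: alternative
-- what changed: Replaces the per-length helper that rescans the string once for every length (n separate scans) with a single combined pass over start/end index pairs that buckets each substring into a preallocated length-indexed table.
import Mathlib
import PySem

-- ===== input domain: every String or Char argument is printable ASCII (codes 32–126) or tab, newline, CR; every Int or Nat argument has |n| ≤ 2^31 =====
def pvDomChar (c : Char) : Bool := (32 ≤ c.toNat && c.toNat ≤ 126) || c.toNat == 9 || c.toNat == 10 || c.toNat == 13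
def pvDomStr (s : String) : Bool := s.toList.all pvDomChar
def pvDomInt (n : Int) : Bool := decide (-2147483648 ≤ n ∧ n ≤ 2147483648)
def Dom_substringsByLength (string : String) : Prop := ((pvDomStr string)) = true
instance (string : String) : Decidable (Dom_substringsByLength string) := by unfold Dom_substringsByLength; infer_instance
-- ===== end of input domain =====

-- B replaces A's per-length helper (n repeated scans) by one combined pass over start/end
-- pairs that buckets each substring into a preallocated length-indexed table (return value only).

-- ===== PORT A =====
def pvSubstring (string : String) (substringLength : Int) : List String :=
  let stringLength : Int := PySem.Str.len string
  if stringLength < substringLength ∨ substringLength = 0 then []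
  else
    (PySem.List.pyRange 0 (stringLength - substringLength + 1) 1).foldl
      (fun result i => result ++ [PySem.Str.slice string (some i) (some (i + substringLength))]) []

def substringsByLength (string : String) : List (List String) :=
  let length : Int := PySem.Str.len string
  if length = 0 then [[]]
  else
    (PySem.List.pyRange 1 (length + 1) 1).foldl
      (fun result i => result ++ [pvSubstring string i]) [[]]

-- ===== PORT B =====
def substringsByLength_alt (string : String) : List (List String) :=
  let n : Int := PySem.Str.len string
  let result : List (List String) := List.replicate (n.toNat + 1) []
  (PySem.List.pyRange 0 n 1).foldl (fun result i =>
    (PySem.List.pyRange (i + 1) (n + 1) 1).foldl (fun result j =>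
      result.set (j - i).toNat
        ((result.getD (j - i).toNat []) ++ [PySem.Str.slice string (some i) (some j)])) result) result

-- ===== PRECONDITION & SPEC =====
def Spec_substringsByLength (string : String) (out : List (List String)) : Prop := out = substringsByLength_alt string
instance (string : String) (out : List (List String)) : Decidable (Spec_substringsByLength string out) := by unfold Spec_substringsByLength; infer_instance

-- ===== CLAIM (what is proved, stated in full; the proofs are below) =====
def Claim_equal_substringsByLength : Prop := ∀ (string : String), Dom_substringsByLength string → Spec_substringsByLength string (substringsByLength string)

-- ===== LEMMAS AND PROOFS =====

-- the canonical bucket of length-L substrings, and the canonical whole result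
def pvBucket (s : String) (n L : Nat) : List String :=
  (List.range (n - L + 1)).map (fun (k : Nat) => PySem.Str.slice s (some ((k : Int))) (some ((k : Int) + (L : Int))))

def pvCanon (s : String) (n : Nat) : List (List String) :=
  [] :: (List.range n).map (fun k => pvBucket s n (k + 1))

-- the single table update B performs
def pvUpd (t : List (List String)) (p : Nat × String) : List (List String) :=
  t.set p.1 ((t.getD p.1 []) ++ [p.2])

theorem length_pvUpd (t : List (List String)) (p : Nat × String) :
    (pvUpd t p).length = t.length := by simp [pvUpd]

theorem length_foldl_pvUpd (acts : List (Nat × String)) (t : List (List String)) :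
    (acts.foldl pvUpd t).length = t.length := by
  induction acts generalizing t with
  | nil => rfl
  | cons a rest ih => simpa [length_pvUpd] using ih (pvUpd t a)

theorem getD_foldl_pvUpd (acts : List (Nat × String)) (t : List (List String)) (b : Nat)
    (hb : b < t.length) :
    (acts.foldl pvUpd t).getD b [] =
      t.getD b [] ++ (acts.filter (fun p => p.1 == b)).map Prod.snd := by
  induction acts generalizing t with
  | nil => simp
  | cons a rest ih =>
    have hlen : (pvUpd t a).length = t.length := length_pvUpd t a
    have := ih (pvUpd t a) (hlen ▸ hb)
    by_cases hab : a.1 = b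
    · subst hab
      have hset : (pvUpd t a).getD a.1 [] = t.getD a.1 [] ++ [a.2] := by
        simp [pvUpd, List.getD, List.getElem?_set_self hb]
      simp only [List.foldl_cons, this, hset, List.filter_cons, List.map_cons, beq_self_eq_true,
        if_true]
      simp [List.append_assoc]
    · have hset : (pvUpd t a).getD b [] = t.getD b [] := by
        simp [pvUpd, List.getD, List.getElem?_set_ne hab]
      have hbeq : (a.1 == b) = false := by simpa using hab
      simp only [List.foldl_cons, this, hset, List.filter_cons, hbeq]
      simp

theorem foldl_foldl_eq_foldl_flatMap (l : List Int) (g : Int → List (Nat × String))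
    (t : List (List String)) :
    l.foldl (fun t i => (g i).foldl pvUpd t) t = (l.flatMap g).foldl pvUpd t := by
  induction l generalizing t with
  | nil => rfl
  | cons x xs ih => simp [List.flatMap_cons, List.foldl_append, ih]

theorem range_filter_succ_eq (m b : Nat) :
    (List.range m).filter (fun k => k + 1 == b) = if 1 ≤ b ∧ b ≤ m then [b - 1] else [] := by
  induction m with
  | zero =>
    have h0 : ¬ (1 ≤ b ∧ b ≤ 0) := by omega
    rw [if_neg h0]; simp
  | succ m ih =>
    rw [List.range_succ, List.filter_append, ih]
    by_cases h : m + 1 = b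
    · have h1 : ¬ (1 ≤ b ∧ b ≤ m) := by omega
      have h2 : 1 ≤ b ∧ b ≤ m + 1 := by omega
      rw [if_neg h1, if_pos h2]
      have hbt : (m + 1 == b) = true := by simpa using h
      simp [hbt]
      omega
    · have hf : (m + 1 == b) = false := by simpa using h
      have hiff : (1 ≤ b ∧ b ≤ m) ↔ (1 ≤ b ∧ b ≤ m + 1) := by omega
      simp [hf, hiff]

theorem flatMap_congr_mem {a b : Type} (l : List a) (f g : a → List b)
    (h : ∀ x ∈ l, f x = g x) : l.flatMap f = l.flatMap g := by
  induction l with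
  | nil => rfl
  | cons x xs ih =>
    rw [List.flatMap_cons, List.flatMap_cons, h x (by simp),
      ih (fun y hy => h y (List.mem_cons_of_mem x hy))]

theorem filter_flatMap' {a b : Type} (l : List a) (g : a → List b) (p : b → Bool) :
    (l.flatMap g).filter p = l.flatMap (fun x => (g x).filter p) := by
  induction l with
  | nil => rfl
  | cons x xs ih => simp [List.flatMap_cons, List.filter_append, ih]

theorem min_range_flatMap {a : Type} (n m : Nat) (f : Nat → a) :
    (List.range n).flatMap (fun k => if k < m then [f k] else []) = (List.range (min m n)).map f := by
  induction n with
  | zero => simp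
  | succ n ih =>
    rw [List.range_succ, List.flatMap_append, ih]
    by_cases h : n < m
    · have h1 : min m n = n := by omega
      have h2 : min m (n + 1) = n + 1 := by omega
      simp [h, h1, List.range_succ]
    · have h1 : min m n = min m (n + 1) := by omega
      simp [h, h1]

theorem pvSubstring_eq_bucket (s : String) (n k : Nat) (hn : (n : Int) = PySem.Str.len s)
    (hk : k < n) : pvSubstring s (1 + (k : Int)) = pvBucket s n (k + 1) := by
  unfold pvSubstring pvBucket
  rw [← hn]
  have hguard : ¬ ((n : Int) < 1 + (k : Int) ∨ (1 : Int) + (k : Int) = 0) := by omega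
  rw [if_neg hguard, PySem.List.foldl_append_singleton_eq_map, PySem.List.pyRange_one,
    List.map_map, List.nil_append]
  have h1 : ((n : Int) - (1 + (k : Int)) + 1 - 0).toNat = n - (k + 1) + 1 := by omega
  rw [h1]
  apply List.map_congr_left
  intro j hj
  simp only [Function.comp_apply]
  congr 2 <;> push_cast <;> ring

theorem a_eq_canon (s : String) : substringsByLength s = pvCanon s s.toList.length := by
  unfold substringsByLength
  rw [PySem.Str.len_eq]
  by_cases h0 : s.toList.length = 0
  · rw [if_pos (by exact_mod_cast h0)]
    simp [pvCanon, h0]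
  · rw [if_neg (by exact_mod_cast h0), PySem.List.foldl_append_singleton_eq_map,
      PySem.List.pyRange_one, List.map_map]
    have h1 : ((s.toList.length : Int) + 1 - 1).toNat = s.toList.length := by omega
    rw [h1]
    unfold pvCanon
    rw [List.singleton_append]
    congr 1
    apply List.map_congr_left
    intro k hk
    exact pvSubstring_eq_bucket s s.toList.length k (by rw [PySem.Str.len_eq]) (List.mem_range.mp hk)

-- per start k: the pairs of the inner loop that land in bucket b
theorem inner_eq (s : String) (n b k : Nat) :
    ((((PySem.List.pyRange ((0 : Int) + (k : Int) + 1) ((n : Int) + 1) 1).map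
        (fun j => ((j - ((0 : Int) + (k : Int))).toNat,
          PySem.Str.slice s (some ((0 : Int) + (k : Int))) (some j)))).filter
            (fun p => p.1 == b)).map Prod.snd)
    = if 1 ≤ b ∧ b ≤ n - k then
        [PySem.Str.slice s (some ((0 : Int) + (k : Int)))
          (some ((0 : Int) + (k : Int) + 1 + ((b - 1 : Nat) : Int)))] else [] := by
  rw [List.filter_map, PySem.List.pyRange_one, List.filter_map, List.map_map, List.map_map]
  have hlen : (((n : Int) + 1 - ((0 : Int) + (k : Int) + 1)).toNat) = n - k := by omega
  rw [hlen]
  rw [List.filter_congr (q := fun m => m + 1 == b)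
    (fun m _ => by
      simp only [Function.comp_apply]
      have h1 : (((0 : Int) + (k : Int) + 1 + (m : Int)) - ((0 : Int) + (k : Int))).toNat
          = m + 1 := by omega
      rw [h1])]
  rw [range_filter_succ_eq]
  by_cases hc : 1 ≤ b ∧ b ≤ n - k
  · rw [if_pos hc, if_pos hc]
    simp only [List.map_cons, List.map_nil, Function.comp_apply]
  · rw [if_neg hc, if_neg hc, List.map_nil]

theorem alt_eq_canon (s : String) : substringsByLength_alt s = pvCanon s s.toList.length := by
  unfold substringsByLength_alt
  rw [PySem.Str.len_eq]
  set n := s.toList.length with hn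
  have hinner : ∀ (i : Int) (t : List (List String)),
      (PySem.List.pyRange (i + 1) ((n : Int) + 1) 1).foldl
        (fun result j => result.set (j - i).toNat
          ((result.getD (j - i).toNat []) ++ [PySem.Str.slice s (some i) (some j)])) t
      = (((PySem.List.pyRange (i + 1) ((n : Int) + 1) 1).map
          (fun j => ((j - i).toNat, PySem.Str.slice s (some i) (some j)))).foldl pvUpd t) := by
    intro i t
    rw [List.foldl_map]
    rfl
  simp only [hinner]
  rw [foldl_foldl_eq_foldl_flatMap]
  have hT0len : (List.replicate (((n : Int)).toNat + 1) ([] : List String)).length = n + 1 := by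
    simp
  have hclen : (pvCanon s n).length = n + 1 := by simp [pvCanon]
  apply List.ext_getElem
  · rw [length_foldl_pvUpd, hT0len, hclen]
  · intro b hb1 hb2
    rw [length_foldl_pvUpd, hT0len] at hb1
    have hbn : b < n + 1 := hb1
    have hgd := getD_foldl_pvUpd
      ((PySem.List.pyRange 0 (n : Int) 1).flatMap
        (fun i => (PySem.List.pyRange (i + 1) ((n : Int) + 1) 1).map
          (fun j => ((j - i).toNat, PySem.Str.slice s (some i) (some j)))))
      (List.replicate (((n : Int)).toNat + 1) ([] : List String)) b (by rw [hT0len]; omega)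
    rw [List.getD_eq_getElem _ _ (by rw [length_foldl_pvUpd, hT0len]; omega)] at hgd
    rw [hgd, List.getD_eq_getElem _ _ (by rw [hT0len]; omega)]
    rw [List.getElem_replicate, List.nil_append]
    -- reshape the action list: outer range, then filter/map through the flatMap
    rw [PySem.List.pyRange_one]
    have h0 : (((n : Int)) - 0).toNat = n := by omega
    rw [h0, List.flatMap_map, filter_flatMap', List.map_flatMap]
    rw [flatMap_congr_mem _ _
      (fun k => if 1 ≤ b ∧ b ≤ n - k then
        [PySem.Str.slice s (some ((0 : Int) + (k : Int)))
          (some ((0 : Int) + (k : Int) + 1 + ((b - 1 : Nat) : Int)))] else [])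
      (fun k _ => by dsimp only; exact inner_eq s n b k)]
    by_cases hb0 : b = 0
    · subst hb0
      have : ∀ k ∈ List.range n, (if 1 ≤ 0 ∧ 0 ≤ n - k then
          [PySem.Str.slice s (some ((0 : Int) + (k : Int)))
            (some ((0 : Int) + (k : Int) + 1 + ((0 - 1 : Nat) : Int)))] else []) = ([] : List String) := by
        intro k _
        dsimp only
        rw [if_neg (by omega)]
      rw [flatMap_congr_mem _ _ _ this]
      simp [pvCanon]
    · have hb1' : 1 ≤ b := by omega
      have hbn' : b ≤ n := by omega
      rw [flatMap_congr_mem _ _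
        (fun k => if k < n - b + 1 then
          [PySem.Str.slice s (some (k : Int)) (some ((k : Int) + (b : Int)))] else [])
        (fun k hk => by
          dsimp only
          have hkn : k < n := List.mem_range.mp hk
          have hiff : (1 ≤ b ∧ b ≤ n - k) ↔ (k < n - b + 1) := by omega
          by_cases hc : k < n - b + 1
          · rw [if_pos (hiff.mpr hc), if_pos hc]
            have e2 : (0 : Int) + (k : Int) + 1 + ((b - 1 : Nat) : Int)
                = (k : Int) + (b : Int) := by omega
            rw [e2]
            have e1 : (0 : Int) + (k : Int) = (k : Int) := by omega
            rw [e1]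
          · rw [if_neg (fun h => hc (hiff.mp h)), if_neg hc])]
      rw [min_range_flatMap]
      have hmin : min (n - b + 1) n = n - b + 1 := by omega
      rw [hmin]
      -- right-hand side: pvCanon at index b ≥ 1
      have hbsub : b - 1 < n := by omega
      unfold pvCanon
      rw [List.getElem_cons]
      simp only [hb0, dite_false]
      rw [List.getElem_map, List.getElem_range]
      have : b - 1 + 1 = b := by omega
      rw [this]
      unfold pvBucket
      rfl
-- ===== VERDICT (by name: the statement is the Claim_ definition above) =====
theorem substringsByLength_spec : Claim_equal_substringsByLength := by
  intro s _
  unfold Spec_substringsByLength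
  rw [a_eq_canon, alt_eq_canon]
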